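-- pv_equiv track=rewrite | github.com/tam1006/Atcoder-Beginner-Contest | problems/ABC/282/e/abc282_e.py | solve
-- ===== SOURCE A (Python) =====
-- from collections import defaultdict
--
-- class UnionFind():
--     def __init__(self, n):
--         self.n = n
--         self.parents = [-1] * n
--
--     def find(self, x):
--         if self.parents[x] < 0:
--             return x
--         else:
--             self.parents[x] = self.find(self.parents[x])
--             return self.parents[x]
--
--     def union(self, x, y):
--         x = self.find(x)
--         y = self.find(y)
--
--         if x == y:
--             return
--
--         if self.parents[x] > self.parents[y]:
--             x, y = y, x
--
--         self.parents[x] += self.parents[y]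
--         self.parents[y] = x
--
--     def size(self, x):
--         return -self.parents[self.find(x)]
--
--     def same(self, x, y):
--         return self.find(x) == self.find(y)
--
--     def members(self, x):
--         root = self.find(x)
--         return [i for i in range(self.n) if self.find(i) == root]
--
--     def roots(self):
--         return [i for i, x in enumerate(self.parents) if x < 0]
--
--     def group_count(self):
--         return len(self.roots())
--
--     def all_group_members(self):
--         group_members = defaultdict(list)
--         for member in range(self.n):
--             group_members[self.find(member)].append(member)
--         return group_members
--
--     def __str__(self):
--         return '\n'.join(f'{r}: {m}' for r, m in self.all_group_members().items())
--
-- def solve(N, M, A):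
--     edges = []
--     for i in range(N):
--         for j in range(i+1, N):
--             cost = (pow(A[i], A[j], M) + pow(A[j], A[i], M)) % M
--             edges.append((cost, i, j))
--
--     edges.sort(reverse=True, key=lambda x: x[0])
--
--     uf = UnionFind(N)
--     ans = 0
--
--     for i in range(len(edges)):
--         cost, u, v = edges[i]
--         if not uf.same(u, v):
--             uf.union(u, v)
--             ans += cost
--
--     return ans
-- ===== SOURCE B (Python) =====
-- # Kruskal on the complete graph, but without the union-find class: connectivity is a
-- # flat component-id list, merged by relabelling. Same greedy edge order as A.
-- def solve(N, M, A):
--     edges = sorted(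
--         (((pow(A[i], A[j], M) + pow(A[j], A[i], M)) % M, i, j)
--          for i in range(N) for j in range(i + 1, N)),
--         key=lambda e: -e[0])
--     comp = list(range(N))
--     ans = 0
--     for cost, u, v in edges:
--         cu, cv = comp[u], comp[v]
--         if cu != cv:
--             comp = [cu if c == cv else c for c in comp]
--             ans += cost
--     return ans
-- ===== Notes on version B (the rewrite author's own statement) =====
-- stated objective: simpler
-- what changed: B drops the whole path-compressed union-by-size UnionFind class and tracks connectivity with a flat component-id list merged by relabelling (and sorts ascending by negated cost instead of reverse=True), keeping the same greedy edge order.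
import Mathlib
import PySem

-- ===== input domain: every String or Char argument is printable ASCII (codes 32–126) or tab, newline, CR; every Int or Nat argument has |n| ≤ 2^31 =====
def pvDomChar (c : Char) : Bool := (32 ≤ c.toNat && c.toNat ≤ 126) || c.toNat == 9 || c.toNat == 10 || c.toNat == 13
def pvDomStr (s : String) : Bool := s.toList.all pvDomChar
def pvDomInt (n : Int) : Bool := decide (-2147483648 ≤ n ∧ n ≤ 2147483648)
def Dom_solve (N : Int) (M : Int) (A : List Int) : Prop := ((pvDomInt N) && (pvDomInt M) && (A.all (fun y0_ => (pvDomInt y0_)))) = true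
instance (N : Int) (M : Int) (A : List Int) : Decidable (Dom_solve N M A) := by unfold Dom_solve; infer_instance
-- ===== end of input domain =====

-- B replaces A's path-compressed union-by-size UnionFind class by a flat component-id
-- list merged by relabelling (same greedy Kruskal edge order); return value only, no
-- observable mutation in either. Objective: simpler.

-- ===== PORT A =====

-- pow(b, e, m) for an Int exponent, hand-ported (PySem.Int.powMod takes a Nat
-- exponent): for e < 0 CPython first inverts b modulo m and raises ValueError when
-- gcd(b, m) ≠ 1 (that case is outside Pre_solve).  Int.gcdA b m is a Bézout
-- coefficient, so when gcd(b, m) = 1 it is ≡ CPython's inverse (mod m); powers of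
-- congruent bases reduced mod m agree, so this is exact wherever CPython returns.
def pyPowModInt (b e m : Int) : Int :=
  if 0 ≤ e then PySem.Int.powMod b e.toNat m
  else PySem.Int.powMod (Int.gcdA b m) (-e).toNat m

-- UnionFind.find with path compression; the recursion is fuelled by the number of
-- nodes (a parent chain in a valid forest is shorter than that, see `chase` lemmas).
def ufFind (fuel : Nat) (p : List Int) (x : Nat) : Nat × List Int :=
  match fuel with
  | 0 => (x, p)  -- unreachable under the loop invariant
  | f+1 =>
    let v := p.getD x 0   -- index in range under the loop invariant
    if v < 0 then (x, p)
    else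
      let r := ufFind f p v.toNat
      (r.1, r.2.set x (Int.ofNat r.1))

-- UnionFind.same: find(x) == find(y), threading the mutated parents array
def ufSame (p : List Int) (x y : Nat) : Bool × List Int :=
  let fx := ufFind p.length p x
  let fy := ufFind fx.2.length fx.2 y
  (fx.1 == fy.1, fy.2)

-- UnionFind.union (union by size: parents[root] holds -size)
def ufUnion (p : List Int) (x y : Nat) : List Int :=
  let fx := ufFind p.length p x
  let fy := ufFind fx.2.length fx.2 y
  let p2 := fy.2
  if fx.1 = fy.1 then p2
  else
    let pr := if p2.getD fx.1 0 > p2.getD fy.1 0 then (fy.1, fx.1) else (fx.1, fy.1)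
    let p3 := p2.set pr.1 (p2.getD pr.1 0 + p2.getD pr.2 0)
    p3.set pr.2 (Int.ofNat pr.1)

def solve (N : Int) (M : Int) (A : List Int) : Int :=
  let edges := (PySem.List.pyRange 0 N 1).foldl (fun acc i =>
      (PySem.List.pyRange (i+1) N 1).foldl (fun acc2 j =>
        acc2 ++ [(PySem.Int.mod
            (pyPowModInt (PySem.List.pyGetD A i 0) (PySem.List.pyGetD A j 0) M
             + pyPowModInt (PySem.List.pyGetD A j 0) (PySem.List.pyGetD A i 0) M) M,
          i, j)]) acc) []
  let es := PySem.List.sorted edges (fun e => e.1) true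
  let st := (PySem.List.pyRange 0 (es.length : Int) 1).foldl (fun (st : List Int × Int) k =>
      let e := PySem.List.pyGetD es k (0, 0, 0)
      let s := ufSame st.1 e.2.1.toNat e.2.2.toNat
      if s.1 then (s.2, st.2)
      else (ufUnion s.2 e.2.1.toNat e.2.2.toNat, st.2 + e.1))
    (List.replicate N.toNat (-1), 0)
  st.2

-- ===== PORT B =====

def solve_alt (N : Int) (M : Int) (A : List Int) : Int :=
  let edges := (PySem.List.pyRange 0 N 1).flatMap (fun i =>
      (PySem.List.pyRange (i+1) N 1).map (fun j =>
        (PySem.Int.mod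
            (pyPowModInt (PySem.List.pyGetD A i 0) (PySem.List.pyGetD A j 0) M
             + pyPowModInt (PySem.List.pyGetD A j 0) (PySem.List.pyGetD A i 0) M) M,
          i, j)))
  let es := PySem.List.sorted edges (fun e => -e.1) false
  let st := es.foldl (fun (st : List Int × Int) e =>
      let cu := PySem.List.pyGetD st.1 e.2.1 0
      let cv := PySem.List.pyGetD st.1 e.2.2 0
      if cu ≠ cv then (st.1.map (fun c => if c = cv then cu else c), st.2 + e.1)
      else st) (PySem.List.pyRange 0 N 1, 0)
  st.2

-- ===== PRECONDITION & SPEC =====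
-- Pre_ excludes exactly the inputs on which the Python raises: M = 0 with N ≥ 2
-- (ValueError in pow), N > len(A) (IndexError), and a pair i ≠ j among the first N
-- entries whose exponent A[j] is negative while the base A[i] is not invertible
-- modulo M (ValueError "base is not invertible").  Everywhere A returns, Pre_ holds.
def Pre_solve (N : Int) (M : Int) (A : List Int) : Prop :=
  N ≤ 1 ∨ (M ≠ 0 ∧ N ≤ (A.length : Int) ∧
    ∀ i, i < N.toNat → ∀ j, j < N.toNat → i ≠ j →
      A.getD j 0 < 0 → Int.gcd (A.getD i 0) M = 1)
instance (N : Int) (M : Int) (A : List Int) : Decidable (Pre_solve N M A) := by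
  unfold Pre_solve; infer_instance

def pvWitness_solve : Int × Int × List Int := (3, 7, [2, -3, 4])

def Spec_solve (N : Int) (M : Int) (A : List Int) (out : Int) : Prop := out = solve_alt N M A
instance (N : Int) (M : Int) (A : List Int) (out : Int) : Decidable (Spec_solve N M A out) := by
  unfold Spec_solve; infer_instance

-- ===== CLAIM (what is proved, stated in full; the proofs are below) =====
def Claim_equal_solve : Prop :=
  ∀ (N : Int) (M : Int) (A : List Int), Dom_solve N M A → Pre_solve N M A →
    Spec_solve N M A (solve N M A)

-- ===== LEMMAS AND PROOFS =====

def pg (p : List Int) (z : Nat) : Int := p.getD z 0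

-- pure root-walk with fuel: `some root` iff the walk meets a root within `f` reads
def chase : Nat → List Int → Nat → Option Nat
  | 0, _, _ => none
  | f+1, p, z => if pg p z < 0 then some z else chase f p (pg p z).toNat

-- every nonnegative parent entry is an in-range index
def Bnd (p : List Int) : Prop := ∀ z, z < p.length → 0 ≤ pg p z → (pg p z).toNat < p.length

-- number of roots (negative entries)
def rc (p : List Int) : Nat := ((Finset.range p.length).filter (fun z => pg p z < 0)).card

-- the coupled loop invariant: A's forest partition = B's label partition
def UFInv (n : Nat) (p l : List Int) : Prop :=
  p.length = n ∧ l.length = n ∧ Bnd p ∧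
  (∀ z, z < n → (chase (n + 1 - rc p) p z).isSome) ∧
  (∀ z w, z < n → w < n → (chase n p z = chase n p w ↔ l.getD z 0 = l.getD w 0))

theorem pg_set_self (p : List Int) (x : Nat) (v : Int) (hx : x < p.length) :
    pg (p.set x v) x = v := by
  simp [pg, List.getD_eq_getElem?_getD, List.getElem?_set_self hx]

theorem pg_set_ne (p : List Int) (x z : Nat) (v : Int) (h : x ≠ z) :
    pg (p.set x v) z = pg p z := by
  simp [pg, List.getD_eq_getElem?_getD, List.getElem?_set_ne h]

theorem chase_mono {f g : Nat} {p : List Int} {z t : Nat} (h : chase f p z = some t)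
    (hfg : f ≤ g) : chase g p z = some t := by
  induction g generalizing f z with
  | zero => cases Nat.le_zero.mp hfg; simp [chase] at h
  | succ g ih =>
    cases f with
    | zero => simp [chase] at h
    | succ f =>
      rw [chase] at h ⊢
      by_cases hc : pg p z < 0
      · rwa [if_pos hc] at h ⊢
      · rw [if_neg hc] at h ⊢; exact ih h (by omega)
theorem chase_pos {f : Nat} {p : List Int} {z t : Nat} (h : chase f p z = some t) :
    1 ≤ f := by
  cases f with
  | zero => simp [chase] at h
  | succ f => omega

theorem chase_unique {f g : Nat} {p : List Int} {z a b : Nat}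
    (ha : chase f p z = some a) (hb : chase g p z = some b) : a = b := by
  have h1 := chase_mono ha (Nat.le_max_left f g)
  have h2 := chase_mono hb (Nat.le_max_right f g)
  rw [h1] at h2; exact Option.some_inj.mp h2

theorem chase_root {f : Nat} {p : List Int} {z t : Nat} (h : chase f p z = some t) :
    pg p t < 0 := by
  induction f generalizing z with
  | zero => simp [chase] at h
  | succ f ih =>
    rw [chase] at h
    split at h
    · cases h; assumption
    · exact ih h

theorem chase_lt {f : Nat} {p : List Int} {z t : Nat} (hB : Bnd p) (hz : z < p.length)
    (h : chase f p z = some t) : t < p.length := by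
  induction f generalizing z with
  | zero => simp [chase] at h
  | succ f ih =>
    rw [chase] at h
    split at h
    · cases h; assumption
    · exact ih (hB z hz (by omega)) h

theorem chase_congr {p q : List Int} (h1 : ∀ w, (pg q w < 0 ↔ pg p w < 0))
    (h2 : ∀ w, 0 ≤ pg p w → pg q w = pg p w) :
    ∀ g z, chase g q z = chase g p z := by
  intro g
  induction g with
  | zero => intro z; rfl
  | succ g ih =>
    intro z
    rw [chase, chase]
    by_cases h : pg p z < 0
    · rw [if_pos ((h1 z).mpr h), if_pos h]
    · rw [if_neg (fun hc => h ((h1 z).mp hc)), if_neg h, h2 z (by omega), ih]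

theorem rc_congr {p q : List Int} (hl : q.length = p.length)
    (h1 : ∀ w, (pg q w < 0 ↔ pg p w < 0)) : rc q = rc p := by
  unfold rc
  rw [hl]
  congr 1
  apply Finset.filter_congr
  intro w _
  simp [h1 w]

theorem rc_set_root {p : List Int} {b : Nat} {v : Int} (hb : b < p.length)
    (hroot : pg p b < 0) (hv : 0 ≤ v) : rc (p.set b v) + 1 = rc p := by
  unfold rc
  rw [List.length_set]
  have he : (Finset.range p.length).filter (fun z => pg (p.set b v) z < 0)
      = ((Finset.range p.length).filter (fun z => pg p z < 0)).erase b := by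
    ext w
    simp only [Finset.mem_filter, Finset.mem_erase, Finset.mem_range]
    constructor
    · intro ⟨hw, hneg⟩
      by_cases hwb : b = w
      · subst hwb; rw [pg_set_self _ _ _ hb] at hneg; omega
      · rw [pg_set_ne _ _ _ _ hwb] at hneg; exact ⟨fun h => hwb h.symm, hw, hneg⟩
    · intro ⟨hwb, hw, hneg⟩
      rw [pg_set_ne _ _ _ _ (fun h => hwb h.symm)]
      exact ⟨hw, hneg⟩
  rw [he, Finset.card_erase_of_mem (by simp [Finset.mem_filter, hb, hroot])]
  have : 0 < ((Finset.range p.length).filter (fun z => pg p z < 0)).card :=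
    Finset.card_pos.mpr ⟨b, by simp [Finset.mem_filter, hb, hroot]⟩
  omega

theorem rc_one_le {p : List Int} {a : Nat} (ha : a < p.length) (hra : pg p a < 0) :
    1 ≤ rc p :=
  Finset.card_pos.mpr ⟨a, by simp [Finset.mem_filter, ha, hra]⟩

theorem rc_le {p : List Int} : rc p ≤ p.length := by
  have := Finset.card_filter_le (Finset.range p.length) (fun z => pg p z < 0)
  simpa using this

theorem chase_set_neg {p : List Int} {b : Nat} {v : Int} (hb : b < p.length)
    (hroot : pg p b < 0) (hv : v < 0) : ∀ g z, chase g (p.set b v) z = chase g p z := by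
  apply chase_congr
  · intro w
    by_cases hwb : b = w
    · subst hwb; rw [pg_set_self _ _ _ hb]; omega
    · rw [pg_set_ne _ _ _ _ hwb]
  · intro w hw
    have hwb : b ≠ w := by intro h; subst h; omega
    rw [pg_set_ne _ _ _ _ hwb]

theorem chase_set_direct {p : List Int} {x r F : Nat} (hx : x < p.length)
    (hxn : 0 ≤ pg p x) (hrx : chase F p x = some r) :
    ∀ g z t, chase g p z = some t → chase g (p.set x (Int.ofNat r)) z = some t := by
  have hrroot : pg p r < 0 := chase_root hrx
  have hrne : x ≠ r := by intro h; subst h; omega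
  intro g
  induction g with
  | zero => intro z t h; simp [chase] at h
  | succ g ih =>
    intro z t h
    have h0 := h
    rw [chase] at h ⊢
    by_cases hzx : z = x
    · subst hzx
      rw [if_neg (by omega)] at h
      have ht : t = r := chase_unique h0 hrx
      subst ht
      rw [pg_set_self _ _ _ hx, if_neg (by simp)]
      have hg1 : 1 ≤ g := chase_pos h
      cases g with
      | zero => omega
      | succ g' =>
        rw [chase]
        have hnn : (Int.ofNat t).toNat = t := rfl
        rw [hnn, pg_set_ne _ _ _ _ hrne, if_pos hrroot]
    · rw [pg_set_ne _ _ _ _ (fun h' => hzx h'.symm)]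
      by_cases hc : pg p z < 0
      · rwa [if_pos hc] at h ⊢
      · rw [if_neg hc] at h ⊢; exact ih _ _ h

theorem chase_link {p : List Int} {a b : Nat} (hab : a ≠ b)
    (hb : b < p.length) (hra : pg p a < 0) (hrb : pg p b < 0) :
    ∀ g z t, chase g p z = some t →
      chase (g+1) (p.set b (Int.ofNat a)) z = some (if t = b then a else t) := by
  intro g
  induction g with
  | zero => intro z t h; simp [chase] at h
  | succ g ih =>
    intro z t h
    rw [chase] at h
    by_cases hzb : z = b
    · subst hzb
      rw [if_pos hrb] at h
      cases h
      rw [chase, pg_set_self _ _ _ hb, if_neg (by simp), chase]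
      have hnn : (Int.ofNat a).toNat = a := rfl
      rw [hnn, pg_set_ne _ _ _ _ (Ne.symm hab), if_pos hra, if_pos rfl]
    · rw [chase, pg_set_ne _ _ _ _ (fun h' => hzb h'.symm)]
      by_cases hc : pg p z < 0
      · rw [if_pos hc] at h; cases h
        rw [if_pos hc, if_neg hzb]
      · rw [if_neg hc] at h
        rw [if_neg hc]
        exact ih _ _ h

theorem find_spec : ∀ (f : Nat) (p : List Int) (x t : Nat), Bnd p → x < p.length →
    chase f p x = some t →
    (ufFind f p x).1 = t ∧
    (ufFind f p x).2.length = p.length ∧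
    Bnd (ufFind f p x).2 ∧
    (∀ w, pg (ufFind f p x).2 w < 0 ↔ pg p w < 0) ∧
    (∀ g z u, chase g p z = some u → chase g (ufFind f p x).2 z = some u) := by
  intro f
  induction f with
  | zero => intro p x t _ _ h; simp [chase] at h
  | succ f ih =>
    intro p x t hB hx h
    have h0 := h
    rw [chase] at h
    rw [ufFind]
    simp only []
    by_cases hc : pg p x < 0
    · rw [if_pos hc] at h
      cases h
      rw [if_pos (by simpa [pg] using hc)]
      exact ⟨rfl, rfl, hB, fun w => Iff.rfl, fun g z u hu => hu⟩
    · rw [if_neg hc] at h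
      have hvx : ¬ (p.getD x 0 < 0) := by simpa [pg] using hc
      rw [if_neg hvx]
      have hv : (pg p x).toNat < p.length := hB x hx (by omega)
      obtain ⟨ih1, ih2, ih3, ih4, ih5⟩ := ih p (pg p x).toNat t hB hv (by simpa [pg] using h)
      set q := (ufFind f p (pg p x).toNat).2 with hq
      have hgd : (p.getD x 0 : Int) = pg p x := rfl
      rw [hgd, ih1]
      have hxq : x < q.length := by rw [ih2]; exact hx
      have hqx : 0 ≤ pg q x := Int.not_lt.mp (fun hlt => hc ((ih4 x).mp hlt))
      have hqchase : chase (f+1) q x = some t := ih5 _ x t h0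
      have htlt : t < p.length := chase_lt hB hx h0
      refine ⟨rfl, ?_, ?_, ?_, ?_⟩
      · rw [List.length_set]; exact ih2
      · intro w hw hnn
        simp only [List.length_set] at hw ⊢
        rw [ih2] at hw ⊢
        by_cases hwx : x = w
        · subst hwx
          rw [pg_set_self _ _ _ hxq] at hnn ⊢
          simpa using htlt
        · rw [pg_set_ne _ _ _ _ hwx] at hnn ⊢
          have h3 := ih3 w (by rw [ih2]; exact hw) hnn
          rwa [ih2] at h3
      · intro w
        by_cases hwx : x = w
        · subst hwx
          rw [pg_set_self _ _ _ hxq]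
          constructor
          · intro hlt; exact absurd hlt (by simp)
          · intro hlt; omega
        · rw [pg_set_ne _ _ _ _ hwx]; exact ih4 w
      · intro g z u hu
        exact chase_set_direct hxq hqx hqchase g z u (ih5 g z u hu)

theorem union_spec {p : List Int} {x y rx ry : Nat} (hB : Bnd p) (hx : x < p.length)
    (hy : y < p.length) (hrx : chase p.length p x = some rx)
    (hry : chase p.length p y = some ry) (hne : rx ≠ ry) :
    ∃ a b, ((a = rx ∧ b = ry) ∨ (a = ry ∧ b = rx)) ∧ a ≠ b ∧
      (ufUnion p x y).length = p.length ∧ Bnd (ufUnion p x y) ∧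
      rc (ufUnion p x y) + 1 = rc p ∧
      (∀ g z t, chase g p z = some t →
        chase (g+1) (ufUnion p x y) z = some (if t = b then a else t)) := by
  obtain ⟨f1, l1, b1, s1, t1⟩ := find_spec p.length p x rx hB hx hrx
  set p1 := (ufFind p.length p x).2 with hp1
  have hry1 : chase p.length p1 y = some ry := t1 _ _ _ hry
  have hry1' : chase p1.length p1 y = some ry := by rw [l1]; exact hry1
  obtain ⟨f2, l2, b2, s2, t2⟩ := find_spec p1.length p1 y ry b1 (by rw [l1]; exact hy) hry1'
  set p2 := (ufFind p1.length p1 y).2 with hp2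
  have l2' : p2.length = p.length := by rw [l2, l1]
  have trans12 : ∀ g z u, chase g p z = some u → chase g p2 z = some u :=
    fun g z u hu => t2 g z u (t1 g z u hu)
  have hrxlt : rx < p.length := chase_lt hB hx hrx
  have hrylt : ry < p.length := chase_lt hB hy hry
  have hrx2 : pg p2 rx < 0 := chase_root (trans12 _ _ _ hrx)
  have hry2 : pg p2 ry < 0 := chase_root (trans12 _ _ _ hry)
  have hqdef : ufUnion p x y =
      (let pr := if p2.getD rx 0 > p2.getD ry 0 then (ry, rx) else (rx, ry)
       let p3 := p2.set pr.1 (p2.getD pr.1 0 + p2.getD pr.2 0)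
       p3.set pr.2 (Int.ofNat pr.1)) := by
    rw [ufUnion]
    simp only [← hp1, ← hp2, f1, f2, if_neg hne]
  set pr := if p2.getD rx 0 > p2.getD ry 0 then (ry, rx) else (rx, ry) with hpr
  have hprcases : (pr.1 = rx ∧ pr.2 = ry) ∨ (pr.1 = ry ∧ pr.2 = rx) := by
    rw [hpr]; split
    · right; exact ⟨rfl, rfl⟩
    · left; exact ⟨rfl, rfl⟩
  obtain ⟨a, b⟩ := pr
  have hab : a ≠ b := by rcases hprcases with ⟨h1, h2⟩ | ⟨h1, h2⟩ <;> subst h1 <;> subst h2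
    <;> simp [hne, Ne.symm hne]
  have halt : a < p.length := by rcases hprcases with ⟨h1, _⟩ | ⟨h1, _⟩ <;> subst h1 <;> assumption
  have hblt : b < p.length := by rcases hprcases with ⟨_, h2⟩ | ⟨_, h2⟩ <;> subst h2 <;> assumption
  have haroot : pg p2 a < 0 := by rcases hprcases with ⟨h1, _⟩ | ⟨h1, _⟩ <;> subst h1 <;> assumption
  have hbroot : pg p2 b < 0 := by rcases hprcases with ⟨_, h2⟩ | ⟨_, h2⟩ <;> subst h2 <;> assumption
  have hgd : ∀ w, p2.getD w 0 = pg p2 w := fun _ => rfl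
  simp only [hgd] at hqdef
  set p3 := p2.set a (pg p2 a + pg p2 b) with hp3
  have hsum : pg p2 a + pg p2 b < 0 := by omega
  have l3 : p3.length = p2.length := by rw [hp3, List.length_set]
  have halt2 : a < p2.length := by rw [l2']; exact halt
  have hblt2 : b < p2.length := by rw [l2']; exact hblt
  have hblt3 : b < p3.length := by rw [l3]; exact hblt2
  have chase3 : ∀ g z, chase g p3 z = chase g p2 z := chase_set_neg halt2 haroot hsum
  have sign3 : ∀ w, pg p3 w < 0 ↔ pg p2 w < 0 := by
    intro w
    by_cases hwa : a = w
    · subst hwa; rw [hp3, pg_set_self _ _ _ halt2]; constructor <;> intro <;> assumption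
    · rw [hp3, pg_set_ne _ _ _ _ hwa]
  have hp3a : pg p3 a < 0 := by rw [hp3, pg_set_self _ _ _ halt2]; exact hsum
  have hp3b : pg p3 b < 0 := by rw [hp3, pg_set_ne _ _ _ _ hab]; exact hbroot
  have bnd3 : Bnd p3 := by
    intro w hw hnn
    rw [l3] at hw ⊢
    by_cases hwa : a = w
    · subst hwa; rw [hp3, pg_set_self _ _ _ halt2] at hnn; omega
    · rw [hp3, pg_set_ne _ _ _ _ hwa] at hnn ⊢; exact b2 w hw hnn
  have hq : ufUnion p x y = p3.set b (Int.ofNat a) := hqdef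
  have lq : (p3.set b (Int.ofNat a)).length = p.length := by
    rw [List.length_set, l3, l2']
  simp only at hprcases
  rw [hq]
  refine ⟨a, b, hprcases, hab, lq, ?_, ?_, ?_⟩
  · intro w hw hnn
    rw [lq] at hw
    rw [lq]
    by_cases hwb : b = w
    · subst hwb
      rw [pg_set_self _ _ _ hblt3]
      have : (Int.ofNat a).toNat = a := rfl
      rw [this]; exact halt
    · rw [pg_set_ne _ _ _ _ hwb] at hnn ⊢
      have h3 := bnd3 w (by rw [l3, l2']; exact hw) hnn
      rwa [l3, l2'] at h3
  · have rc1 : rc p1 = rc p := rc_congr l1 s1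
    have rc2 : rc p2 = rc p1 := rc_congr l2 s2
    have rc3 : rc p3 = rc p2 := rc_congr l3 sign3
    have rcq : rc (p3.set b (Int.ofNat a)) + 1 = rc p3 :=
      rc_set_root hblt3 hp3b (by simp)
    omega
  · intro g z t ht
    have h2 : chase g p2 z = some t := trans12 g z t ht
    have h3 : chase g p3 z = some t := by rw [chase3]; exact h2
    exact chase_link hab hblt3 hp3a hp3b g z t h3

theorem merge_iff {α : Type} [DecidableEq α] (a b x y : α) (hab : a ≠ b) :
    ((if x = b then a else x) = (if y = b then a else y)) ↔
      (x = y ∨ ((x = a ∨ x = b) ∧ (y = a ∨ y = b))) := by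
  split_ifs with h1 h2 h2 <;> subst_eqs <;> try tauto
  constructor
  · tauto
  · rintro (rfl | ⟨(rfl | h), (rfl | h')⟩) <;> tauto

theorem lget_map (l : List Int) (f : Int → Int) (z : Nat) (hz : z < l.length) :
    (l.map f).getD z 0 = f (l.getD z 0) := by
  rw [List.getD_eq_getElem?_getD, List.getD_eq_getElem?_getD, List.getElem?_map]
  rw [List.getElem?_eq_getElem hz]
  rfl

theorem same_spec {n : Nat} {p : List Int} {u v ru rv : Nat} (hp : p.length = n)
    (hB : Bnd p) (hu : u < n) (hv : v < n)
    (hru : chase n p u = some ru) (hrv : chase n p v = some rv) :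
    (ufSame p u v).1 = (ru == rv) ∧
    (ufSame p u v).2.length = n ∧ Bnd (ufSame p u v).2 ∧
    (∀ w, pg (ufSame p u v).2 w < 0 ↔ pg p w < 0) ∧
    (∀ g z t, chase g p z = some t → chase g (ufSame p u v).2 z = some t) := by
  subst hp
  obtain ⟨f1, l1, b1, s1, t1⟩ := find_spec p.length p u ru hB hu hru
  set p1 := (ufFind p.length p u).2 with hp1
  have hrv1 : chase p1.length p1 v = some rv := by rw [l1]; exact t1 _ _ _ hrv
  obtain ⟨f2, l2, b2, s2, t2⟩ := find_spec p1.length p1 v rv b1 (by rw [l1]; exact hv) hrv1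
  rw [ufSame]
  simp only [← hp1, f1, f2]
  exact ⟨trivial, by rw [l2, l1], b2,
    fun w => (s2 w).trans (s1 w),
    fun g z t ht => t2 g z t (t1 g z t ht)⟩

theorem pair_bridge {tz tw ru rv a b : Nat} {lz lw lu lv : Int}
    (habcase : (a = ru ∧ b = rv) ∨ (a = rv ∧ b = ru))
    (e1 : tz = tw ↔ lz = lw) (g1 : tz = ru ↔ lz = lu) (g2 : tz = rv ↔ lz = lv)
    (g3 : tw = ru ↔ lw = lu) (g4 : tw = rv ↔ lw = lv) :
    ((tz = tw) ∨ ((tz = a ∨ tz = b) ∧ (tw = a ∨ tw = b))) ↔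
    ((lz = lw) ∨ ((lz = lu ∨ lz = lv) ∧ (lw = lu ∨ lw = lv))) := by
  rcases habcase with ⟨rfl, rfl⟩ | ⟨rfl, rfl⟩ <;> tauto

set_option maxHeartbeats 2000000 in
theorem loop_sim (n : Nat) : ∀ (es : List (Int × Int × Int)) (p l : List Int) (ans : Int),
    UFInv n p l →
    (∀ e ∈ es, 0 ≤ e.2.1 ∧ e.2.1 < e.2.2 ∧ e.2.2 < (n : Int)) →
    (es.foldl (fun (st : List Int × Int) e =>
        let s := ufSame st.1 e.2.1.toNat e.2.2.toNat
        if s.1 then (s.2, st.2)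
        else (ufUnion s.2 e.2.1.toNat e.2.2.toNat, st.2 + e.1)) (p, ans)).2 =
    (es.foldl (fun (st : List Int × Int) e =>
        let cu := PySem.List.pyGetD st.1 e.2.1 0
        let cv := PySem.List.pyGetD st.1 e.2.2 0
        if cu ≠ cv then (st.1.map (fun c => if c = cv then cu else c), st.2 + e.1)
        else st) (l, ans)).2 := by
  intro es
  induction es with
  | nil => intro p l ans _ _; rfl
  | cons e es ih =>
    intro p l ans hInv hbd
    obtain ⟨hp, hl, hB, hfuel, hcoup⟩ := hInv
    obtain ⟨hb1, hb2, hb3⟩ := hbd e List.mem_cons_self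
    set u := e.2.1.toNat with hudef
    set v := e.2.2.toNat with hvdef
    have hu : u < n := by omega
    have hv : v < n := by omega
    have huI : (u : Int) = e.2.1 := by omega
    have hvI : (v : Int) = e.2.2 := by omega
    have hrc1 : 1 ≤ rc p := by
      obtain ⟨tv, htv⟩ := Option.isSome_iff_exists.mp (hfuel v hv)
      exact rc_one_le (p := p) (chase_lt hB (by omega) htv) (chase_root htv)
    have hrcle : rc p ≤ n := by have := rc_le (p := p); omega
    have hchase : ∀ z, z < n → ∃ t, chase n p z = some t := by
      intro z hz
      obtain ⟨t, ht⟩ := Option.isSome_iff_exists.mp (hfuel z hz)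
      exact ⟨t, chase_mono ht (by omega)⟩
    obtain ⟨ru, hru⟩ := hchase u hu
    obtain ⟨rv, hrv⟩ := hchase v hv
    obtain ⟨sm1, sml, smB, smS, smT⟩ := same_spec hp hB hu hv hru hrv
    set p2 := (ufSame p u v).2 with hp2
    have hrcp2 : rc p2 = rc p := rc_congr (by rw [sml, hp]) smS
    have hlu : PySem.List.pyGetD l e.2.1 0 = l.getD u 0 := by
      rw [PySem.List.pyGetD_of_nonneg l 0 hb1]
    have hlv : PySem.List.pyGetD l e.2.2 0 = l.getD v 0 := by
      rw [PySem.List.pyGetD_of_nonneg l 0 (by omega)]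
    have hiff : (ru = rv) ↔ (l.getD u 0 = l.getD v 0) := by
      rw [← hcoup u v hu hv, hru, hrv]
      exact ⟨fun h => by rw [h], fun h => Option.some_inj.mp h⟩
    simp only [List.foldl_cons]
    by_cases heq : ru = rv
    · have hsm : (ufSame p u v).1 = true := by rw [sm1]; simp [heq]
      have hlab : ¬ (PySem.List.pyGetD l e.2.1 0 ≠ PySem.List.pyGetD l e.2.2 0) := by
        rw [hlu, hlv]; exact not_not_intro (hiff.mp heq)
      rw [if_pos hsm, if_neg hlab]
      apply ih
      · refine ⟨sml, hl, smB, ?_, ?_⟩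
        · intro z hz
          obtain ⟨t, ht⟩ := Option.isSome_iff_exists.mp (hfuel z hz)
          rw [hrcp2]
          exact Option.isSome_iff_exists.mpr ⟨t, smT _ z t ht⟩
        · intro z w hz hw
          obtain ⟨tz, htz⟩ := hchase z hz
          obtain ⟨tw, htw⟩ := hchase w hw
          rw [smT _ z tz htz, smT _ w tw htw, ← htz, ← htw]
          exact hcoup z w hz hw
      · exact fun e' he' => hbd e' (List.mem_cons_of_mem e he')
    · have hsm : ¬ ((ufSame p u v).1 = true) := by rw [sm1]; simp [heq]
      have hlab : (PySem.List.pyGetD l e.2.1 0 ≠ PySem.List.pyGetD l e.2.2 0) := by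
        rw [hlu, hlv]; exact fun h => heq (hiff.mpr h)
      rw [if_neg hsm, if_pos hlab]
      rw [hlu, hlv]
      rw [hlu, hlv] at hlab
      set lu := l.getD u 0 with hludef
      set lv := l.getD v 0 with hlvdef
      have hu2 : u < p2.length := by rw [sml]; exact hu
      have hv2 : v < p2.length := by rw [sml]; exact hv
      have hru2 : chase p2.length p2 u = some ru := by rw [sml]; exact smT _ u ru hru
      have hrv2 : chase p2.length p2 v = some rv := by rw [sml]; exact smT _ v rv hrv
      obtain ⟨a, b, habcase, hab, lq, bq, rcq, tq⟩ :=
        union_spec smB hu2 hv2 hru2 hrv2 heq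
      set q := ufUnion p2 u v with hqdef
      have lqn : q.length = n := by rw [lq, sml]
      have hrcq : rc q + 1 = rc p := by rw [← hrcp2]; exact rcq
      have harith : n + 1 - rc q = (n + 1 - rc p) + 1 := by omega
      have hQ1 : ∀ z, z < n → ∀ t, chase n p z = some t →
          chase (n+1) q z = some (if t = b then a else t) := by
        intro z hz t ht
        exact tq n z t (smT n z t ht)
      have hrootq : 1 ≤ rc q := by
        have h1 := hQ1 u hu ru hru
        have h2 : (if ru = b then a else ru) < q.length :=
          chase_lt bq (by rw [lqn]; exact hu) h1
        exact rc_one_le h2 (chase_root h1)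
      have hlen : n + 1 - rc q ≤ n := by omega
      have hfuelq : ∀ z, z < n → (chase (n + 1 - rc q) q z).isSome := by
        intro z hz
        obtain ⟨t, ht⟩ := Option.isSome_iff_exists.mp (hfuel z hz)
        have ht2 := smT _ z t ht
        have ht3 := tq _ z t ht2
        rw [harith]
        exact Option.isSome_iff_exists.mpr ⟨_, ht3⟩
      have hQ : ∀ z, z < n → ∀ t, chase n p z = some t →
          chase n q z = some (if t = b then a else t) := by
        intro z hz t ht
        obtain ⟨s, hs⟩ := Option.isSome_iff_exists.mp (hfuelq z hz)
        have hs' := chase_mono hs hlen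
        have := chase_unique hs' (hQ1 z hz t ht)
        rwa [this] at hs'
      apply ih
      · refine ⟨lqn, by rw [List.length_map]; exact hl, bq, hfuelq, ?_⟩
        intro z w hz hw
        obtain ⟨tz, htz⟩ := hchase z hz
        obtain ⟨tw, htw⟩ := hchase w hw
        rw [hQ z hz tz htz, hQ w hw tw htw]
        rw [lget_map l _ z (by rw [hl]; exact hz), lget_map l _ w (by rw [hl]; exact hw)]
        have e1 : tz = tw ↔ l.getD z 0 = l.getD w 0 := by
          rw [← hcoup z w hz hw, htz, htw]
          exact ⟨fun h => by rw [h], fun h => Option.some_inj.mp h⟩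
        have g1 : tz = ru ↔ l.getD z 0 = lu := by
          rw [← hcoup z u hz hu, htz, hru]
          exact ⟨fun h => by rw [h], fun h => Option.some_inj.mp h⟩
        have g2 : tz = rv ↔ l.getD z 0 = lv := by
          rw [← hcoup z v hz hv, htz, hrv]
          exact ⟨fun h => by rw [h], fun h => Option.some_inj.mp h⟩
        have g3 : tw = ru ↔ l.getD w 0 = lu := by
          rw [← hcoup w u hw hu, htw, hru]
          exact ⟨fun h => by rw [h], fun h => Option.some_inj.mp h⟩
        have g4 : tw = rv ↔ l.getD w 0 = lv := by
          rw [← hcoup w v hw hv, htw, hrv]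
          exact ⟨fun h => by rw [h], fun h => Option.some_inj.mp h⟩
        have hlune : lu ≠ lv := hlab
        have hbr := pair_bridge habcase e1 g1 g2 g3 g4
        constructor
        · intro h
          have h' := Option.some_inj.mp h
          rw [merge_iff _ _ _ _ hab] at h'
          rw [merge_iff _ _ _ _ hlune]
          exact hbr.mp h'
        · intro h
          rw [merge_iff _ _ _ _ hlune] at h
          have h' : (if tz = b then a else tz) = (if tw = b then a else tw) := by
            rw [merge_iff _ _ _ _ hab]
            exact hbr.mpr h
          rw [h']
      · exact fun e' he' => hbd e' (List.mem_cons_of_mem e he')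

theorem inv_init (N : Int) :
    UFInv N.toNat (List.replicate N.toNat (-1)) (PySem.List.pyRange 0 N 1) := by
  set n := N.toNat with hn
  have hpg : ∀ z, z < n → pg (List.replicate n (-1)) z = -1 := by
    intro z hz
    simp [pg, List.getD_eq_getElem?_getD, hz]
  have hchase1 : ∀ z, z < n → chase 1 (List.replicate n (-1)) z = some z := by
    intro z hz
    rw [chase, if_pos (by rw [hpg z hz]; omega)]
  have hrc : rc (List.replicate n (-1)) = n := by
    unfold rc
    rw [List.length_replicate]
    rw [Finset.filter_true_of_mem (fun z hz => by
      rw [hpg z (Finset.mem_range.mp hz)]; omega)]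
    exact Finset.card_range n
  have hlget : ∀ z, z < n → (PySem.List.pyRange 0 N 1).getD z 0 = (z : Int) := by
    intro z hz
    rw [PySem.List.pyRange_one]
    rw [List.getD_eq_getElem?_getD, List.getElem?_map]
    rw [List.getElem?_range (by omega)]
    simp
  refine ⟨List.length_replicate, ?_, ?_, ?_, ?_⟩
  · rw [PySem.List.length_pyRange_one]; omega
  · intro z hz h0
    rw [hpg z (by rwa [List.length_replicate] at hz)] at h0
    omega
  · intro z hz
    rw [hrc]
    have : n + 1 - n = 1 := by omega
    rw [this, hchase1 z hz]
    rfl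
  · intro z w hz hw
    rw [chase_mono (hchase1 z hz) (by omega), chase_mono (hchase1 w hw) (by omega)]
    rw [hlget z hz, hlget w hw]
    constructor
    · intro h; have := Option.some_inj.mp h; exact_mod_cast this
    · intro h; have : z = w := by exact_mod_cast h
      rw [this]

theorem nested_fold {α : Type} (xs : List Int) (f : Int → List Int) (g : Int → Int → α) :
    (xs.foldl (fun acc i => (f i).foldl (fun acc2 j => acc2 ++ [g i j]) acc) []) =
    xs.flatMap (fun i => (f i).map (g i)) := by
  simp only [PySem.List.foldl_append_singleton_eq_map]
  rw [PySem.List.foldl_append_eq_flatMap, List.nil_append]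

theorem sorted_neg (es : List (Int × Int × Int)) :
    PySem.List.sorted es (fun e => e.1) true = PySem.List.sorted es (fun e => -e.1) false := by
  rw [PySem.List.sorted_rev_eq_foldl_insertBy, PySem.List.sorted_eq_foldl_insertBy]
  have : (fun (a b : Int × Int × Int) => decide (b.1 < a.1)) =
      (fun (a b : Int × Int × Int) => decide (-a.1 < -b.1)) := by
    funext a b
    rw [decide_eq_decide]
    omega
  rw [this]

set_option maxHeartbeats 1000000 in
theorem solve_eq (N M : Int) (A : List Int) : solve N M A = solve_alt N M A := by
  rw [solve, solve_alt]
  have hedges := nested_fold (PySem.List.pyRange 0 N 1) (fun i => PySem.List.pyRange (i+1) N 1)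
    (fun i j => (PySem.Int.mod
            (pyPowModInt (PySem.List.pyGetD A i 0) (PySem.List.pyGetD A j 0) M
             + pyPowModInt (PySem.List.pyGetD A j 0) (PySem.List.pyGetD A i 0) M) M,
          i, j))
  rw [hedges, sorted_neg]
  set es := PySem.List.sorted ((PySem.List.pyRange 0 N 1).flatMap (fun i =>
      (PySem.List.pyRange (i+1) N 1).map (fun j =>
        (PySem.Int.mod
            (pyPowModInt (PySem.List.pyGetD A i 0) (PySem.List.pyGetD A j 0) M
             + pyPowModInt (PySem.List.pyGetD A j 0) (PySem.List.pyGetD A i 0) M) M,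
          i, j)))) (fun e => -e.1) false with hes
  rw [PySem.List.foldl_pyRange_zero_pyGetD' es (0, 0, 0)
    (fun (st : List Int × Int) e =>
      let s := ufSame st.1 e.2.1.toNat e.2.2.toNat
      if s.1 then (s.2, st.2)
      else (ufUnion s.2 e.2.1.toNat e.2.2.toNat, st.2 + e.1))
    (List.replicate N.toNat (-1), 0)]
  apply loop_sim N.toNat es _ _ 0 (inv_init N)
  intro e he
  rw [hes, PySem.List.mem_sorted] at he
  obtain ⟨i, hi, hj⟩ := List.mem_flatMap.mp he
  obtain ⟨j, hjmem, rfl⟩ := List.mem_map.mp hj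
  obtain ⟨hi0, hiN⟩ := PySem.List.mem_pyRange_one.mp hi
  obtain ⟨hj1, hjN⟩ := PySem.List.mem_pyRange_one.mp hjmem
  exact ⟨show (0:Int) ≤ i by omega, show i < j by omega, show j < ((N.toNat : Nat) : Int) by omega⟩

-- ===== VERDICT (by name: the statement is the Claim_ definition above) =====
theorem solve_spec : Claim_equal_solve := by
  intro N M A _ _
  unfold Spec_solve
  exact solve_eq N M A
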